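-- pv_equiv track=rewrite | github.com/pypi-data/pypi-mirror-402 | packages/wiselib/wiselib-0.3.33-py3-none-any.whl/wise/utils/formatters/number_formatter.py | minify_number_repeats
-- ===== SOURCE A (Python) =====
-- def minify_number_repeats(numb_str):
--     zero_length = 0
--     output = ""
--     for char in numb_str:
--         if char == "0":
--             zero_length += 1
--         else:
--             if zero_length > 0:
--                 if zero_length <= 2:
--                     output += "0" * zero_length
--                 else:
--                     output += f"0₍{str(zero_length).translate(str.maketrans('0123456789', '₀₁₂₃₄₅₆₇₈₉'))}₎"
--                 zero_length = 0
--             output += char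
--     return output
-- ===== SOURCE B (Python) =====
-- _SUB = "\u2080\u2081\u2082\u2083\u2084\u2085\u2086\u2087\u2088\u2089"
--
-- def _enc(n):
--     if n <= 2:
--         return "0" * n
--     return "0\u208d" + "".join(_SUB[int(d)] for d in str(n)) + "\u208e"
--
-- def minify_number_repeats(numb_str):
--     # trailing zero run is never flushed by the formatter, so drop it up front
--     s = numb_str.rstrip("0")
--     pieces = []
--     i = 0
--     n = len(s)
--     while i < n:
--         if s[i] != "0":
--             pieces.append(s[i])
--             i += 1
--         else:
--             j = i
--             while j < n and s[j] == "0":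
--                 j += 1
--             pieces.append(_enc(j - i))
--             i = j
--     return "".join(pieces)
-- ===== Notes on version B (the rewrite author's own statement) =====
-- stated objective: alternative
-- what changed: B first right-strips the trailing zero run (which A never flushes) and then scans the string run by run with two indices (an inner while locates each whole zero run), collecting pieces in a list joined at the end, instead of A's per-character loop that threads a pending-zeros counter and flushes it on each non-zero character via string concatenation.
import Mathlib
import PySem

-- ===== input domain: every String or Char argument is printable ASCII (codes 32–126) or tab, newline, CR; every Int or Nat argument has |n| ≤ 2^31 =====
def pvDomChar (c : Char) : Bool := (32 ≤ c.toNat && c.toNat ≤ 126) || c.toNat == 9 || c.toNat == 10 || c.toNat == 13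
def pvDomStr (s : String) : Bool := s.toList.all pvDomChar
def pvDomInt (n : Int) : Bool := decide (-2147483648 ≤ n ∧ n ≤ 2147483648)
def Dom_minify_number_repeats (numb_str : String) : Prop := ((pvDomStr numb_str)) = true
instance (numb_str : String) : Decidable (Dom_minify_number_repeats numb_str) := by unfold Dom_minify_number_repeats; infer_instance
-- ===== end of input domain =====

-- B drops the trailing zero run up front (A never flushes it) and then scans the string
-- run by run with two indices, instead of A's per-character loop with a pending-zeros counter;
-- objective: alternative decomposition, same cost.

-- ===== PORT A =====

-- str.maketrans('0123456789', '₀₁₂₃₄₅₆₇₈₉'): digits map to subscripts, every other char unchanged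
def pvTransA (c : Char) : Char :=
  if c = '0' then '₀' else if c = '1' then '₁' else if c = '2' then '₂'
  else if c = '3' then '₃' else if c = '4' then '₄' else if c = '5' then '₅'
  else if c = '6' then '₆' else if c = '7' then '₇' else if c = '8' then '₈'
  else if c = '9' then '₉' else c

-- the flush of a pending zero run: "0"*z if z <= 2, else the subscript form
def pvFlushA (z : Int) : List Char :=
  if z ≤ 2 then List.replicate z.toNat '0'
  else '0' :: '₍' :: ((PySem.Int.toChars z).map pvTransA ++ ['₎'])

def minify_number_repeats (numb_str : String) : String :=
  String.ofList
    (numb_str.toList.foldl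
      (fun (s : Int × List Char) char =>
        if char = '0' then (s.1 + 1, s.2)
        else (0, (if s.1 > 0 then s.2 ++ pvFlushA s.1 else s.2) ++ [char]))
      (0, [])).2

-- ===== PORT B =====

-- Source B's _SUB[int(d)]: digit char d indexes "₀₁₂₃₄₅₆₇₈₉"
def pvSubB (c : Char) : Char :=
  if c = '0' then '₀' else if c = '1' then '₁' else if c = '2' then '₂'
  else if c = '3' then '₃' else if c = '4' then '₄' else if c = '5' then '₅'
  else if c = '6' then '₆' else if c = '7' then '₇' else if c = '8' then '₈'
  else if c = '9' then '₉' else c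

-- Source B's _enc(n)
def pvEncB (n : Int) : List Char :=
  if n ≤ 2 then List.replicate n.toNat '0'
  else '0' :: '₍' :: ((PySem.Int.toChars n).map pvSubB ++ ['₎'])

-- Source B's outer while loop: peel one non-zero char, or one whole zero run (the inner while)
def pvGoB : List Char → List Char
  | [] => []
  | c :: cs =>
    if c = '0' then
      pvEncB (1 + ((cs.takeWhile (fun x => decide (x = '0'))).length : Int))
        ++ pvGoB (cs.dropWhile (fun x => decide (x = '0')))
    else c :: pvGoB cs
termination_by l => l.length
decreasing_by
  · simpa using Nat.lt_succ_of_le (List.length_dropWhile_le _ cs)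
  · simp

-- s.rstrip("0"), ported by hand (exact: strips exactly the trailing '0' characters)
def pvRstrip0 (l : List Char) : List Char :=
  (l.reverse.dropWhile (fun x => decide (x = '0'))).reverse

def minify_number_repeats_alt (numb_str : String) : String :=
  String.ofList (pvGoB (pvRstrip0 numb_str.toList))

-- ===== PRECONDITION & SPEC =====
def Spec_minify_number_repeats (numb_str : String) (out : String) : Prop := out = minify_number_repeats_alt numb_str
instance (numb_str : String) (out : String) : Decidable (Spec_minify_number_repeats numb_str out) := by unfold Spec_minify_number_repeats; infer_instance

-- ===== CLAIM (what is proved, stated in full; the proofs are below) =====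
def Claim_equal_minify_number_repeats : Prop := ∀ (numb_str : String), Dom_minify_number_repeats numb_str → Spec_minify_number_repeats numb_str (minify_number_repeats numb_str)

-- ===== LEMMAS AND PROOFS =====

-- A's loop body, as a recursion over the remaining characters with the pending-zeros counter
def pvBodyA (z : Int) : List Char → List Char
  | [] => []
  | c :: cs =>
    if c = '0' then pvBodyA (z + 1) cs
    else (if z > 0 then pvFlushA z else []) ++ c :: pvBodyA 0 cs

theorem pvFoldA_eq (cs : List Char) : ∀ (z : Int) (acc : List Char),
    (cs.foldl
      (fun (s : Int × List Char) char =>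
        if char = '0' then (s.1 + 1, s.2)
        else (0, (if s.1 > 0 then s.2 ++ pvFlushA s.1 else s.2) ++ [char]))
      (z, acc)).2 = acc ++ pvBodyA z cs := by
  induction cs with
  | nil => intro z acc; simp [pvBodyA]
  | cons c cs ih =>
    intro z acc
    by_cases h : c = '0'
    · simp [h, pvBodyA, List.foldl_cons, ih]
    · simp only [List.foldl_cons, pvBodyA, if_neg h]
      rw [ih]
      by_cases hz : z > 0 <;> simp [hz]

theorem pvBodyA_zeros (m : Nat) : ∀ z, pvBodyA z (List.replicate m '0') = [] := by
  induction m with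
  | zero => intro z; simp [pvBodyA]
  | succ m ih => intro z; simp [List.replicate_succ, pvBodyA, ih]

theorem pvBodyA_trail (cs : List Char) (m : Nat) : ∀ z,
    pvBodyA z (cs ++ List.replicate m '0') = pvBodyA z cs := by
  induction cs with
  | nil => intro z; simp [pvBodyA, pvBodyA_zeros]
  | cons c cs ih =>
    intro z
    by_cases h : c = '0' <;> simp [pvBodyA, h, ih]

theorem pvRstrip0_decomp (l : List Char) :
    l = pvRstrip0 l ++ List.replicate (l.reverse.takeWhile (fun x => decide (x = '0'))).length '0' := by
  conv_lhs => rw [← l.reverse_reverse, ← List.takeWhile_append_dropWhile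
    (p := fun x => decide (x = '0')) (l := l.reverse)]
  rw [List.reverse_append, pvRstrip0]
  congr 1
  rw [List.eq_replicate_iff]
  constructor
  · simp
  · intro b hb
    rw [List.mem_reverse] at hb
    have := List.mem_takeWhile_imp hb
    simpa using this

theorem pvTakeWhile_rep_append (n : Nat) (c : Char) (hc : ¬ c = '0') (cs : List Char) :
    (List.replicate n '0' ++ c :: cs).takeWhile (fun x => decide (x = '0')) = List.replicate n '0' ∧
    (List.replicate n '0' ++ c :: cs).dropWhile (fun x => decide (x = '0')) = c :: cs := by
  induction n with
  | zero => simp [hc]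
  | succ n ih => simp [List.replicate_succ, ih]

theorem pvGetLast?_cons {c : Char} {cs : List Char} (h : cs ≠ []) :
    (c :: cs).getLast? = cs.getLast? := by
  cases cs with
  | nil => exact absurd rfl h
  | cons d ds => simp [List.getLast?_cons_cons]

-- the core correspondence: A's pending-counter recursion equals B's run scanner on a
-- string with no trailing zeros, with the pending z re-materialised as leading zeros
theorem pvBodyA_eq_goB (t : List Char) : t.getLast? ≠ some '0' → t ≠ [] →
    ∀ z : Int, 0 ≤ z → pvBodyA z t = pvGoB (List.replicate z.toNat '0' ++ t) := by
  induction t with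
  | nil => intro _ h; exact absurd rfl h
  | cons c cs ih =>
    intro hlast _ z hz
    by_cases h : c = '0'
    · subst h
      have hcs : cs ≠ [] := by
        rintro rfl; exact hlast (by simp)
      have hlast' : cs.getLast? ≠ some '0' := by
        rwa [pvGetLast?_cons hcs] at hlast
      have : pvBodyA z ('0' :: cs) = pvBodyA (z + 1) cs := by simp [pvBodyA]
      rw [this, ih hlast' hcs (z + 1) (by omega)]
      congr 1
      have : (z + 1).toNat = z.toNat + 1 := by omega
      rw [this, List.replicate_succ']
      simp
    · -- c ≠ '0'
      have htail : pvBodyA 0 cs = pvGoB cs := by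
        rcases eq_or_ne cs [] with rfl | hcs
        · simp [pvBodyA, pvGoB]
        · have hlast' : cs.getLast? ≠ some '0' := by
            rwa [pvGetLast?_cons hcs] at hlast
          simpa using ih hlast' hcs 0 le_rfl
      rcases eq_or_lt_of_le hz with hz0 | hzpos
      · -- z = 0
        rw [← hz0]
        simp [pvBodyA, pvGoB, h, htail]
      · -- z > 0
        obtain ⟨n, hn⟩ : ∃ n, z.toNat = n + 1 := ⟨z.toNat - 1, by omega⟩
        rw [hn, List.replicate_succ]
        have hrun := pvTakeWhile_rep_append n c h cs
        rw [List.cons_append]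
        have hstep : pvGoB ('0' :: (List.replicate n '0' ++ c :: cs))
            = pvEncB (1 + ((List.replicate n '0').length : Int)) ++ pvGoB (c :: cs) := by
          simp only [pvGoB, hrun.1, hrun.2]
          simp
        rw [hstep]
        have hzn : (1 + ((List.replicate n '0').length : Int)) = z := by
          simp [List.length_replicate]; omega
        rw [hzn]
        have hstep2 : pvGoB (c :: cs) = c :: pvGoB cs := by simp only [pvGoB, if_neg h]
        rw [hstep2]
        have : pvFlushA z = pvEncB z := rfl
        simp [pvBodyA, h, hzpos, htail, this]

theorem pvRstrip0_getLast? (l : List Char) : (pvRstrip0 l).getLast? ≠ some '0' := by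
  rw [pvRstrip0, List.getLast?_reverse]
  intro h
  have hne : l.reverse.dropWhile (fun x => decide (x = '0')) ≠ [] := by
    intro h0; rw [h0] at h; simp at h
  have := List.head_dropWhile_not (l := l.reverse) (fun x => decide (x = '0')) hne
  rw [List.head?_eq_some_head hne] at h
  simp [Option.some_inj.mp h] at this

theorem pvBodyA_eq_goB_rstrip (l : List Char) : pvBodyA 0 l = pvGoB (pvRstrip0 l) := by
  rw [pvRstrip0_decomp l, pvBodyA_trail, ← pvRstrip0_decomp l]
  rcases eq_or_ne (pvRstrip0 l) [] with h | h
  · rw [h]; simp [pvBodyA, pvGoB]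
  · simpa using pvBodyA_eq_goB (pvRstrip0 l) (pvRstrip0_getLast? l) h 0 le_rfl

-- ===== VERDICT (by name: the statement is the Claim_ definition above) =====
theorem minify_number_repeats_spec : Claim_equal_minify_number_repeats := by
  intro numb_str _
  unfold Spec_minify_number_repeats minify_number_repeats minify_number_repeats_alt
  rw [pvFoldA_eq, pvBodyA_eq_goB_rstrip]
  simp
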